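-- pv_equiv track=rewrite | github.com/nding17/WhiterockAI | scripts/data scraping/master_data_scraping.py | _check_prop_type
-- ===== SOURCE A (Python) =====
-- def _check_prop_type(features):
--     prop_types = ['condo',
--                   'multi family',
--                   'townhouse',
--                   'single family',
--                   'lot land',
--                   'mobile']
--
--     prop_type = None
--
--     for feature in features:
--         feature = feature.lower()
--
--         for pt in prop_types:
--             if pt in feature:
--                 prop_type = feature.title()
--                 break
--
--     return prop_type
-- ===== SOURCE B (Python) =====
-- def _check_prop_type(features):
--     prop_types = ['condo',
--                   'multi family',
--                   'townhouse',
--                   'single family',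
--                   'lot land',
--                   'mobile']
--
--     for feature in reversed(list(features)):
--         low = feature.lower()
--         if any(pt in low for pt in prop_types):
--             return low.title()
--     return None
-- ===== Notes on version B (the rewrite author's own statement) =====
-- stated objective: alternative
-- what changed: Scans the list backwards and returns at the first (= last-in-order) feature containing a property-type keyword, instead of accumulating the last match through a full forward scan with a nested break loop.
import Mathlib
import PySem

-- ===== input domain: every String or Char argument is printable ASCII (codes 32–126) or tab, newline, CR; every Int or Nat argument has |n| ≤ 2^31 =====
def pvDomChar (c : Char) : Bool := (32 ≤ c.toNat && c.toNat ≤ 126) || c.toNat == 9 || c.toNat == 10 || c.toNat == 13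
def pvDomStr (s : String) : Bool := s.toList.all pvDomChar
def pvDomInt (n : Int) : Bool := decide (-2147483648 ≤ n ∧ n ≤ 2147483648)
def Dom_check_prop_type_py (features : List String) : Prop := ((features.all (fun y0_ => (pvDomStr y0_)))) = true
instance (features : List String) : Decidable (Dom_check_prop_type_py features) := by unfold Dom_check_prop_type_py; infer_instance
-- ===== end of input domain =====

-- B reverses the scan and returns at the first (= last-in-original-order) matching feature,
-- replacing A's forward accumulation with a nested break loop. Objective: alternative.

-- str.title() for ASCII, shared by both ports (PySem has no title primitive; exact on the
-- printable-ASCII domain: a letter after a non-letter is uppercased, other letters lowercased)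
def pyTitleChars : List Char → Bool → List Char
  | [], _ => []
  | c :: cs, prevAlpha =>
    if PySem.Chars.isalpha c then
      (if prevAlpha then PySem.Chars.lowerChar c else PySem.Chars.upperChar c) :: pyTitleChars cs true
    else
      c :: pyTitleChars cs false

def pyTitle (s : String) : String := String.ofList (pyTitleChars s.toList false)

def propTypesPy : List String :=
  ["condo", "multi family", "townhouse", "single family", "lot land", "mobile"]

-- ===== PORT A =====
-- inner 'for pt in prop_types: if pt in feature: prop_type = feature.title(); break'
def checkPropInner (feature : String) : List String → Option String → Option String
  | [], acc => acc
  | pt :: rest, acc =>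
    if PySem.Str.isIn pt feature then some (pyTitle feature)
    else checkPropInner feature rest acc

def check_prop_type_py (features : List String) : Option String :=
  features.foldl (fun acc f => checkPropInner (PySem.Str.lower f) propTypesPy acc) none

-- ===== PORT B =====
-- any(pt in low for pt in prop_types)
def matchesProp (low : String) : Bool := propTypesPy.any (fun pt => PySem.Str.isIn pt low)

def checkPropRev : List String → Option String
  | [] => none
  | f :: rest =>
    let low := PySem.Str.lower f
    if matchesProp low then some (pyTitle low)
    else checkPropRev rest

def check_prop_type_py_alt (features : List String) : Option String :=
  checkPropRev features.reverse

-- ===== PRECONDITION & SPEC =====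
def Spec_check_prop_type_py (features : List String) (out : Option String) : Prop := out = check_prop_type_py_alt features
instance (features : List String) (out : Option String) : Decidable (Spec_check_prop_type_py features out) := by unfold Spec_check_prop_type_py; infer_instance

-- ===== CLAIM (what is proved, stated in full; the proofs are below) =====
def Claim_equal_check_prop_type_py : Prop := ∀ (features : List String), Dom_check_prop_type_py features → Spec_check_prop_type_py features (check_prop_type_py features)

-- ===== LEMMAS AND PROOFS =====


theorem checkPropInner_eq (feature : String) (acc : Option String) : ∀ pts : List String,
    checkPropInner feature pts acc =
      if pts.any (fun pt => PySem.Str.isIn pt feature) then some (pyTitle feature) else acc := by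
  intro pts
  induction pts with
  | nil => simp [checkPropInner]
  | cons pt rest ih =>
      rw [checkPropInner, ih, List.any_cons]
      cases h : PySem.Str.isIn pt feature
      · rw [Bool.false_or, if_neg (by simp)]
      · rw [Bool.true_or, if_pos rfl, if_pos rfl]

theorem checkPropInner_eq' (feature : String) (acc : Option String) :
    checkPropInner feature propTypesPy acc =
      if matchesProp feature then some (pyTitle feature) else acc :=
  checkPropInner_eq feature acc propTypesPy

theorem checkPropRev_append (xs : List String) (f : String) :
    checkPropRev (xs ++ [f]) =
      match checkPropRev xs with
      | some v => some v
      | none =>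
          if matchesProp (PySem.Str.lower f) then some (pyTitle (PySem.Str.lower f))
          else none := by
  induction xs with
  | nil => simp only [List.nil_append, checkPropRev]
  | cons g t ih =>
      simp only [List.cons_append, checkPropRev, ih]
      cases h : matchesProp (PySem.Str.lower g)
      · simp only [Bool.false_eq_true, if_false]
      · simp only [if_true]

theorem foldl_eq_rev (l : List String) : ∀ acc : Option String,
    l.foldl (fun acc f => checkPropInner (PySem.Str.lower f) propTypesPy acc) acc =
      match checkPropRev l.reverse with
      | some v => some v
      | none => acc := by
  induction l with
  | nil => intro acc; simp [checkPropRev]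
  | cons f t ih =>
      intro acc
      rw [List.foldl_cons, ih, List.reverse_cons, checkPropRev_append, checkPropInner_eq']
      cases h : checkPropRev t.reverse
      · cases hm : matchesProp (PySem.Str.lower f)
        · simp only [hm, Bool.false_eq_true, if_false]
        · simp only [hm, if_true]
      · rfl

-- ===== VERDICT (by name: the statement is the Claim_ definition above) =====
theorem check_prop_type_py_spec : Claim_equal_check_prop_type_py := by
  intro features _
  unfold Spec_check_prop_type_py check_prop_type_py check_prop_type_py_alt
  rw [foldl_eq_rev]
  cases checkPropRev features.reverse <;> simp
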